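-- pv_equiv track=rewrite | github.com/luisrnandezc/performance-cessna-172 | src/data.py | valid_roc_press_alt
-- ===== SOURCE A (Python) =====
-- def valid_roc_press_alt(takeoff_press_alt):
--     """Returns the corrected pressure altitude for ROC computation."""
--     valid_altitudes = list(range(0, 14000, 2000))
--     max_alt = valid_altitudes[-1]
--     if takeoff_press_alt > max_alt:
--         return max_alt
--     for valid_alt in valid_altitudes:
--         if takeoff_press_alt == valid_alt:
--             return valid_alt
--         elif takeoff_press_alt >= valid_alt + 500:
--             continue
--         else:
--             return valid_alt
-- ===== SOURCE B (Python) =====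
-- def valid_roc_press_alt(takeoff_press_alt):
--     """Returns the corrected pressure altitude for ROC computation (closed form)."""
--     if takeoff_press_alt > 12000:
--         return 12000
--     if takeoff_press_alt < 500:
--         return 0
--     base = (takeoff_press_alt // 2000) * 2000
--     return base if takeoff_press_alt - base < 500 else base + 2000
-- ===== Notes on version B (the rewrite author's own statement) =====
-- stated objective: simpler
-- what changed: Replaced the linear scan over the altitude list with a closed-form arithmetic rounding: clamp at the top altitude, floor to the relevant altitude step and bump to the next step when at or beyond the split point, with an explicit zero result below the first split.
import Mathlib
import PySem

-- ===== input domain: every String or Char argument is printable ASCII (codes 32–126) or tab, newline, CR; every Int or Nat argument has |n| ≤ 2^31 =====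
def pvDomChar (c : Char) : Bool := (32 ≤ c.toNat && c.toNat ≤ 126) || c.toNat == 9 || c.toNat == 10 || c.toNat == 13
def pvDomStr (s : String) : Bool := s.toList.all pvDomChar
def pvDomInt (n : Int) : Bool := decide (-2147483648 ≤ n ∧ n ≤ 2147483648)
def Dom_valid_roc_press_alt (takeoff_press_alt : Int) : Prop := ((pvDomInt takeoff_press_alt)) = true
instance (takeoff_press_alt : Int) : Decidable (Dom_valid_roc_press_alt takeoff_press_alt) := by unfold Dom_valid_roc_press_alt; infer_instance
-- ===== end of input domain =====

-- B replaces A's scan of the 7-element altitude list by a closed-form arithmetic rounding; objective: simpler.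

-- ===== PORT A =====
-- the for-loop: returns the first valid_alt with t == valid_alt or t < valid_alt + 500; none = loop exhausted (Python would return None; unreachable under the max_alt guard)
def rocLoop (t : Int) : List Int → Option Int
  | [] => none
  | v :: rest =>
    if t = v then some v
    else if t ≥ v + 500 then rocLoop t rest
    else some v

def valid_roc_press_alt (takeoff_press_alt : Int) : Int :=
  let valid_altitudes := PySem.List.pyRange 0 14000 2000
  match PySem.List.pyGet? valid_altitudes (-1) with
  | none => 0  -- unreachable: valid_altitudes is nonempty
  | some max_alt =>
    if takeoff_press_alt > max_alt then max_alt
    else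
      -- fall-through default (Python's implicit None) is unreachable when takeoff_press_alt ≤ max_alt
      (rocLoop takeoff_press_alt valid_altitudes).getD 0

-- ===== PORT B =====
def valid_roc_press_alt_alt (takeoff_press_alt : Int) : Int :=
  if takeoff_press_alt > 12000 then 12000
  else if takeoff_press_alt < 500 then 0
  else
    let base := PySem.Int.floordiv takeoff_press_alt 2000 * 2000
    if takeoff_press_alt - base < 500 then base else base + 2000

-- ===== PRECONDITION & SPEC =====
def Spec_valid_roc_press_alt (takeoff_press_alt : Int) (out : Int) : Prop := out = valid_roc_press_alt_alt takeoff_press_alt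
instance (takeoff_press_alt : Int) (out : Int) : Decidable (Spec_valid_roc_press_alt takeoff_press_alt out) := by unfold Spec_valid_roc_press_alt; infer_instance

-- ===== CLAIM (what is proved, stated in full; the proofs are below) =====
def Claim_equal_valid_roc_press_alt : Prop := ∀ (takeoff_press_alt : Int), Dom_valid_roc_press_alt takeoff_press_alt → Spec_valid_roc_press_alt takeoff_press_alt (valid_roc_press_alt takeoff_press_alt)

-- ===== LEMMAS AND PROOFS =====

lemma rocRange_eq : PySem.List.pyRange 0 14000 2000 = [0, 2000, 4000, 6000, 8000, 10000, 12000] := by decide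

lemma rocLast : PySem.List.pyGet? ([0, 2000, 4000, 6000, 8000, 10000, 12000] : List Int) (-1) = some 12000 := by decide

-- one loop step: both the equal and the '< v+500' exits return v
lemma rocLoop_cons (t v : Int) (rest : List Int) :
    rocLoop t (v :: rest) = if t < v + 500 then some v else rocLoop t rest := by
  simp only [rocLoop]; split_ifs <;> first | rfl | omega

-- interval characterisation of the loop on the literal altitude list
lemma rocLoop_eq (t : Int) :
    rocLoop t [0, 2000, 4000, 6000, 8000, 10000, 12000] =
      if t < 500 then some 0
      else if t < 2500 then some 2000
      else if t < 4500 then some 4000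
      else if t < 6500 then some 6000
      else if t < 8500 then some 8000
      else if t < 10500 then some 10000
      else if t < 12500 then some 12000
      else none := by
  simp only [rocLoop_cons]
  simp only [rocLoop]
  norm_num

lemma floordiv_2000_eq (t : Int) : PySem.Int.floordiv t 2000 * 2000 = t / 2000 * 2000 := by
  rw [PySem.Int.floordiv_eq_ediv_of_pos (by norm_num)]

-- ===== VERDICT (by name: the statement is the Claim_ definition above) =====
theorem valid_roc_press_alt_spec : Claim_equal_valid_roc_press_alt := by
  intro t _
  unfold Spec_valid_roc_press_alt valid_roc_press_alt valid_roc_press_alt_alt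
  rw [rocRange_eq]
  simp only [rocLast, rocLoop_eq, floordiv_2000_eq]
  split_ifs <;> simp_all <;> omega
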